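-- pv_equiv track=rewrite | github.com/estnltk/estnltk | estnltk/estnltk/taggers/system/rule_taggers/regex_library/string_list.py | make_case_insensitive
-- ===== SOURCE A (Python) =====
-- def make_case_insensitive(pattern: str):
--     '''Converts given pattern to a case insensitive pattern.
--        For that, replaces all alphabet letters with a set of characters
--        containing an uppercase and a lowercase variant of the character.
--        Exceptions are letters preceded by '\\', which will be ignored.
--        Note that for this to work, pattern needs to be restricted so
--        that is does not contain: sets of characters, flag letters and
--        named capturing groups.
--     '''
--     new_pattern = []
--     prev_char = ''
--     for c in pattern:
--         if c.isalpha() and prev_char != '\\':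
--             new_pattern.append(f'[{c.upper()}{c.lower()}]')
--         else:
--             new_pattern.append(c)
--         prev_char = c
--     return ''.join(new_pattern)
-- ===== SOURCE B (Python) =====
-- import re
--
-- def make_case_insensitive(pattern: str):
--     '''Case-insensitive pattern via one regex substitution: every character
--        not preceded by a backslash is rewritten by the callback, which turns
--        alphabetic characters into [Uu] sets and leaves everything else as is.'''
--     def repl(m):
--         c = m.group(0)
--         return f'[{c.upper()}{c.lower()}]' if c.isalpha() else c
--     return re.sub(r'(?<!\\).', repl, pattern, flags=re.DOTALL)
-- ===== Notes on version B (the rewrite author's own statement) =====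
-- stated objective: idiomatic
-- what changed: Replaces the manual character loop with prev_char state by a single re.sub with a negative lookbehind (?<!\\). and a callback that rewrites alphabetic matches to [Uu] sets.
import Mathlib
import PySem

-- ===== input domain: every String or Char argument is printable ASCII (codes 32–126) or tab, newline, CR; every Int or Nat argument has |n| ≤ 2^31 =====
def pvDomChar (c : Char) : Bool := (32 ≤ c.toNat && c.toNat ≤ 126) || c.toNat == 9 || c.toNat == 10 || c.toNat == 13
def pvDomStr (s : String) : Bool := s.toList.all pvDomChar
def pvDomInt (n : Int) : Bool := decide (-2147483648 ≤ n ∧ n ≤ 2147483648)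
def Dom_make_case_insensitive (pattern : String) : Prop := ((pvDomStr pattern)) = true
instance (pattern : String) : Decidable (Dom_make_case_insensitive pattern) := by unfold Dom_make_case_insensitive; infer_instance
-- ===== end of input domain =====

-- B replaces A's manual loop with prev_char state by a single regex substitution
-- re.sub(r'(?<!\\).', repl, pattern, flags=re.DOTALL) (objective: idiomatic).

-- ===== PORT A =====
-- A: loop over the characters, carrying prev_char (a string, initially ''),
-- appending '[Uu]' for an alphabetic char not preceded by '\', else the char; ''.join at the end.
def pvGoA : List Char → String → List String
  | [], _ => []
  | c :: rest, prev =>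
    (if PySem.Chars.isalpha c && prev != "\\" then
       String.ofList ['[', PySem.Chars.upperChar c, PySem.Chars.lowerChar c, ']']
     else String.ofList [c]) :: pvGoA rest (String.ofList [c])

def make_case_insensitive (pattern : String) : String :=
  PySem.Str.join "" (pvGoA pattern.toList "")

-- ===== PORT B =====
-- B's callback: an alphabetic match becomes '[Uu]', any other match is returned unchanged.
def pvRepl (c : Char) : List Char :=
  if PySem.Chars.isalpha c then ['[', PySem.Chars.upperChar c, PySem.Chars.lowerChar c, ']'] else [c]

-- the re.sub scan of r'(?<!\\).' with DOTALL, ported by hand (exact: '.' with DOTALL matches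
-- any single character, so the scanner matches at a position iff the lookbehind holds — the
-- previous character, if any, is not '\'; on a failed match it advances one character,
-- copying it to the output unchanged).
def pvSub : Option Char → List Char → List Char
  | _, [] => []
  | prev, c :: rest =>
    (if prev = some '\\' then [c] else pvRepl c) ++ pvSub (some c) rest

def make_case_insensitive_alt (pattern : String) : String :=
  String.ofList (pvSub none pattern.toList)

-- ===== PRECONDITION & SPEC =====
def Spec_make_case_insensitive (pattern : String) (out : String) : Prop := out = make_case_insensitive_alt pattern
instance (pattern : String) (out : String) : Decidable (Spec_make_case_insensitive pattern out) := by unfold Spec_make_case_insensitive; infer_instance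

-- ===== CLAIM (what is proved, stated in full; the proofs are below) =====
def Claim_equal_make_case_insensitive : Prop := ∀ (pattern : String), Dom_make_case_insensitive pattern → Spec_make_case_insensitive pattern (make_case_insensitive pattern)

-- ===== LEMMAS AND PROOFS =====

-- A's prev_char string corresponding to B's optional previous character.
def pvPrevStr : Option Char → String
  | none => ""
  | some c => String.ofList [c]

lemma pvPrevStr_bne (p : Option Char) : (pvPrevStr p != "\\") = !(p == some '\\') := by
  cases p with
  | none => decide
  | some c =>
    by_cases h : c = '\\'
    · subst h; decide
    · have hne : pvPrevStr (some c) ≠ "\\" := by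
        intro hEq
        have := congrArg String.toList hEq
        simp [pvPrevStr] at this
        exact h this
      have h1 : (pvPrevStr (some c) == "\\") = false := beq_eq_false_iff_ne.mpr hne
      have h2 : ((some c : Option Char) == some '\\') = false := by simp [h]
      simp [bne, h1, h2]

lemma pvIntercalate_nil {α : Type} (l : List (List α)) : List.intercalate [] l = l.flatten := by
  induction l with
  | nil => rfl
  | cons x xs ih =>
    cases xs with
    | nil => simp [List.intercalate]
    | cons y ys =>
      simp only [List.intercalate, List.intersperse] at *
      simp_all

-- the loop and the substitution scan emit the same characters, given corresponding prev states
lemma pvGoA_eq_pvSub (l : List Char) (p : Option Char) :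
    ((pvGoA l (pvPrevStr p)).map String.toList).flatten = pvSub p l := by
  induction l generalizing p with
  | nil => rfl
  | cons c rest ih =>
    have hstep : String.ofList [c] = pvPrevStr (some c) := rfl
    simp only [pvGoA, pvSub, pvRepl, pvPrevStr_bne, hstep, List.map_cons, List.flatten_cons,
      ih (some c)]
    by_cases hp : p = some '\\'
    · simp [hp, pvPrevStr]
    · have h2 : (p == some '\\') = false := beq_eq_false_iff_ne.mpr hp
      by_cases ha : PySem.Chars.isalpha c <;> simp [h2, ha, hp, pvPrevStr]

-- ===== VERDICT (by name: the statement is the Claim_ definition above) =====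
theorem make_case_insensitive_spec : Claim_equal_make_case_insensitive := by
  intro pattern _
  unfold Spec_make_case_insensitive make_case_insensitive make_case_insensitive_alt
  apply String.toList_inj.mp
  have hj := PySem.Str.toList_join "" (pvGoA pattern.toList "")
  have : PySem.Chars.join "".toList = List.intercalate ([] : List Char) := rfl
  rw [hj, this, pvIntercalate_nil]
  calc ((pvGoA pattern.toList "").map String.toList).flatten
      = ((pvGoA pattern.toList (pvPrevStr none)).map String.toList).flatten := rfl
    _ = pvSub none pattern.toList := pvGoA_eq_pvSub pattern.toList none
    _ = (String.ofList (pvSub none pattern.toList)).toList := by simp
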